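-- pv_equiv track=rewrite | github.com/yue-su/algo | core_algo/variation_1.py | bubbleSortNegatives
-- ===== SOURCE A (Python) =====
-- def bubbleSortNegatives(array: [int]) -> [int]:
--     # Write your code here.
--     for i in range(len(array) - 1):
--         for j in range(len(array) - i - 1):
--             if array[j] < 0:
--                 continue
--             if array[j] > array[j+1]:
--                 array[j], array[j+1] = array[j+1], array[j]
--     return array
-- ===== SOURCE B (Python) =====
-- def bubbleSortNegatives(array: [int]) -> [int]:
--     # stable-partition negatives to the front, sort the non-negatives
--     negatives = [x for x in array if x < 0]
--     non_negatives = sorted(x for x in array if x >= 0)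
--     return negatives + non_negatives
-- ===== Notes on version B (the rewrite author's own statement) =====
-- stated objective: faster
-- what changed: Replaced the negative-skipping O(n^2) bubble sort by a single stable partition (negatives kept in original order) followed by sorting the non-negatives, which is what the bubble passes converge to.
import Mathlib
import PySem

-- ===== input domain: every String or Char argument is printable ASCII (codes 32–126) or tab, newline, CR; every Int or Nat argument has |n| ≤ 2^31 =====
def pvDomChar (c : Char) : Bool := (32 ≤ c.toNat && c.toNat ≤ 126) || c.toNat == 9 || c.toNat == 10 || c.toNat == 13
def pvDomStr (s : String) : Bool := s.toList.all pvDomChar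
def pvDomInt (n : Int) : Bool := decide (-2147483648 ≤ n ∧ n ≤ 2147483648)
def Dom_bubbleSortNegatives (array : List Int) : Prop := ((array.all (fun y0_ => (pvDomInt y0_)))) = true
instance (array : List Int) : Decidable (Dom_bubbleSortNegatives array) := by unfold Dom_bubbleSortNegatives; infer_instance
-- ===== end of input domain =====

-- B stable-partitions the negatives to the front and sorts the non-negatives, instead of A's
-- negative-skipping bubble sort; equivalence is about the RETURN value (Python A sorts its argument in place).

-- ===== PORT A =====
-- one inner-loop step of A: the body of 'for j in range(len(array) - i - 1)'
def pvSwapStep (a : List Int) (j : Int) : List Int :=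
  let x := PySem.List.pyGetD a j 0       -- array[j]   (index always in range in A's loops)
  let y := PySem.List.pyGetD a (j+1) 0   -- array[j+1]
  if x < 0 then a
  else if x > y then PySem.List.pySetD (PySem.List.pySetD a j y) (j+1) x
  else a

def bubbleSortNegatives (array : List Int) : List Int :=
  (PySem.List.pyRange 0 (PySem.List.len array - 1)).foldl
    (fun a i =>
      (PySem.List.pyRange 0 (PySem.List.len array - i - 1)).foldl
        (fun a j => pvSwapStep a j) a)
    array

-- ===== PORT B =====
def bubbleSortNegatives_alt (array : List Int) : List Int :=
  (array.filter (fun x => x < 0)) ++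
    PySem.List.sorted (array.filter (fun x => x ≥ 0)) (fun x => x)

-- ===== PRECONDITION & SPEC =====
def Spec_bubbleSortNegatives (array : List Int) (out : List Int) : Prop := out = bubbleSortNegatives_alt array
instance (array : List Int) (out : List Int) : Decidable (Spec_bubbleSortNegatives array out) := by unfold Spec_bubbleSortNegatives; infer_instance

-- ===== CLAIM (what is proved, stated in full; the proofs are below) =====
def Claim_equal_bubbleSortNegatives : Prop := ∀ (array : List Int), Dom_bubbleSortNegatives array → Spec_bubbleSortNegatives array (bubbleSortNegatives array)

-- ===== LEMMAS AND PROOFS =====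

-- structural version of A's inner loop: 'bpass k a' performs the j = 0 .. k-1 steps of one pass
def bpass : Nat → List Int → List Int
  | 0, a => a
  | _+1, [] => []
  | _+1, [x] => [x]
  | k+1, x :: y :: t =>
      if x < 0 then x :: bpass k (y :: t)
      else if x > y then y :: bpass k (x :: t)
      else x :: bpass k (y :: t)

-- structural version of A's outer loop: passes with bounds m, m-1, …, 1
def outerIter : Nat → List Int → List Int
  | 0, a => a
  | k+1, a => outerIter k (bpass (k+1) a)

-- one carrying pass starting with carry c (used to analyse a full pass once the first non-negative is reached)
def cpass (c : Int) : List Int → List Int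
  | [] => [c]
  | y :: t => if c > y then y :: cpass c t else c :: cpass y t

-- natural-index version of A's inner-loop step
def natStep (a : List Int) (j : Nat) : List Int :=
  let x := a.getD j 0
  let y := a.getD (j+1) 0
  if x < 0 then a
  else if x > y then (a.set j y).set (j+1) x
  else a

theorem pvSwapStep_natCast (a : List Int) (j : Nat) : pvSwapStep a (j : Int) = natStep a j := by
  have h1 : ((j:Int)+1) = ((j+1 : Nat) : Int) := by push_cast; ring
  simp only [pvSwapStep, natStep, h1, PySem.List.pyGetD_natCast, PySem.List.pySetD_natCast]

theorem natStep_shift (a : List Int) (z : Int) (j : Nat) :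
    natStep (z :: a) (j+1) = z :: natStep a j := by
  simp [natStep]
  split_ifs <;> rfl

theorem foldl_natStep_map_succ (js : List Nat) : ∀ (a : List Int) (z : Int),
    (js.map Nat.succ).foldl natStep (z :: a) = z :: js.foldl natStep a := by
  induction js with
  | nil => intro a z; rfl
  | cons j js ih =>
      intro a z
      simp only [List.map_cons, List.foldl_cons, natStep_shift]
      exact ih (natStep a j) z

theorem length_bpass (k : Nat) : ∀ a : List Int, (bpass k a).length = a.length := by
  induction k with
  | zero => intro a; rfl
  | succ k ih =>
      intro a
      match a with
      | [] => rfl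
      | [x] => rfl
      | x :: y :: t =>
          simp only [bpass]
          split_ifs <;> simp [ih]

theorem ipass_eq_bpass (k : Nat) : ∀ a : List Int, k < a.length →
    (List.range k).foldl natStep a = bpass k a := by
  induction k with
  | zero => intro a _; rfl
  | succ k ih =>
      intro a h
      match a, h with
      | x :: y :: t, h =>
          rw [List.range_succ_eq_map]
          simp only [List.foldl_cons]
          have hs : natStep (x :: y :: t) 0 =
              if x < 0 then x :: y :: t else if x > y then y :: x :: t else x :: y :: t := by
            simp [natStep]
          rw [hs]
          simp only [bpass]
          have hlen : k < (y :: t).length := by simpa using Nat.lt_of_succ_lt_succ h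
          have hlen' : k < (x :: t).length := by simpa using Nat.lt_of_succ_lt_succ h
          split_ifs with h1 h2
          · rw [foldl_natStep_map_succ, ih _ hlen]
          · rw [foldl_natStep_map_succ, ih _ hlen']
          · rw [foldl_natStep_map_succ, ih _ hlen]

theorem inner_bridge (k : Nat) (a : List Int) (h : k < a.length) :
    (PySem.List.pyRange 0 (k : Int)).foldl (fun a j => pvSwapStep a j) a = bpass k a := by
  rw [PySem.List.pyRange_zero_nat, List.foldl_map]
  have hf : (fun (b : List Int) (j : Nat) => pvSwapStep b (j : Int)) = natStep :=
    funext fun b => funext fun j => pvSwapStep_natCast b j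
  rw [hf]
  exact ipass_eq_bpass k a h

theorem outer_bridge (L : Nat) : ∀ (m : Nat) (a : List Int), a.length = L → m < L →
    (PySem.List.pyRange ((L:Int) - 1 - m) ((L:Int) - 1)).foldl
      (fun a i => (PySem.List.pyRange 0 ((L:Int) - i - 1)).foldl (fun a j => pvSwapStep a j) a) a
    = outerIter m a := by
  intro m
  induction m with
  | zero =>
      intro a hl hm
      rw [PySem.List.pyRange_one_eq_nil (by omega)]
      rfl
  | succ m ih =>
      intro a hl hm
      rw [PySem.List.pyRange_one_cons (by push_cast; omega)]
      simp only [List.foldl_cons]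
      have hb : (L:Int) - ((L:Int) - 1 - ((m:Int)+1)) - 1 = ((m+1 : Nat) : Int) := by push_cast; ring
      have hc : ((L:Int) - 1 - ↑(m+1)) = ((L:Int) - 1 - ((m:Int)+1)) := by push_cast; ring
      rw [hc, hb, inner_bridge (m+1) a (by omega)]
      have hd : (L:Int) - 1 - ((m:Int)+1) + 1 = (L:Int) - 1 - (m:Int) := by ring
      rw [hd, ih (bpass (m+1) a) (by rw [length_bpass]; exact hl) (by omega)]
      rfl

theorem portA_eq_outerIter (a : List Int) :
    bubbleSortNegatives a = outerIter (a.length - 1) a := by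
  match a with
  | [] => rfl
  | x :: t =>
      unfold bubbleSortNegatives
      simp only [PySem.List.len_eq]
      have h1 : ((x :: t).length : Int) - 1 = ((x :: t).length : Int) - 1 - (((x :: t).length - 1 : Nat) : Int) + (((x :: t).length - 1 : Nat) : Int) := by ring
      have h0 : ((x :: t).length : Int) - 1 - (((x :: t).length - 1 : Nat) : Int) = 0 := by
        simp [List.length_cons]
      have h2 : PySem.List.pyRange 0 (((x :: t).length : Int) - 1) =
          PySem.List.pyRange (((x :: t).length : Int) - 1 - (((x :: t).length - 1 : Nat) : Int)) (((x :: t).length : Int) - 1) := by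
        rw [h0]
      rw [h2]
      exact outer_bridge (x :: t).length ((x :: t).length - 1) (x :: t) rfl (by simp)

-- all-negative lists are fixed points
theorem bpass_allneg (k : Nat) : ∀ a : List Int, (∀ z ∈ a, z < 0) → bpass k a = a := by
  induction k with
  | zero => intro a _; rfl
  | succ k ih =>
      intro a h
      match a with
      | [] => rfl
      | [x] => rfl
      | x :: y :: t =>
          have hx : x < 0 := h x (by simp)
          simp only [bpass, if_pos hx]
          rw [ih (y :: t) (fun z hz => h z (by simp [List.mem_cons] at hz ⊢; tauto))]

theorem outerIter_allneg (m : Nat) : ∀ a : List Int, (∀ z ∈ a, z < 0) → outerIter m a = a := by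
  induction m with
  | zero => intro a _; rfl
  | succ m ih =>
      intro a h
      simp only [outerIter]
      rw [bpass_allneg _ a h]
      exact ih a h

-- a pass of k steps only touches the first k+1 elements
theorem bpass_append (k : Nat) : ∀ (u s : List Int), k < u.length →
    bpass k (u ++ s) = bpass k u ++ s := by
  induction k with
  | zero => intro u s _; rfl
  | succ k ih =>
      intro u s h
      match u with
      | [] => simp at h
      | [x] => simp at h
      | x :: y :: t =>
          have hl : k < (y :: t).length := by simp at h ⊢; omega
          have hl' : k < (x :: t).length := by simp at h ⊢; omega
          simp only [List.cons_append, bpass]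
          split_ifs with h1 h2
          · rw [show y :: (t ++ s) = (y :: t) ++ s from rfl, ih (y :: t) s hl]; rfl
          · rw [show x :: (t ++ s) = (x :: t) ++ s from rfl, ih (x :: t) s hl']; rfl
          · rw [show y :: (t ++ s) = (y :: t) ++ s from rfl, ih (y :: t) s hl]; rfl

theorem outerIter_append (m : Nat) : ∀ (u s : List Int), m < u.length →
    outerIter m (u ++ s) = outerIter m u ++ s := by
  induction m with
  | zero => intro u s _; rfl
  | succ m ih =>
      intro u s h
      simp only [outerIter]
      rw [bpass_append (m+1) u s h]
      exact ih (bpass (m+1) u) s (by rw [length_bpass]; omega)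

-- a pass skips an all-negative prefix
theorem bpass_neg_prefix (p : List Int) : ∀ (k : Nat) (b : List Int), (∀ z ∈ p, z < 0) → b ≠ [] →
    bpass (p.length + k) (p ++ b) = p ++ bpass k b := by
  induction p with
  | nil => intro k b _ _; simp
  | cons z p ih =>
      intro k b hneg hb
      have hz : z < 0 := hneg z (by simp)
      match hpb : p ++ b with
      | [] => exact absurd (List.append_eq_nil_iff.mp hpb).2 hb
      | w :: ws =>
          have hlen : (z :: p).length + k = (p.length + k) + 1 := by simp; omega
          rw [hlen]
          simp only [List.cons_append, hpb, bpass, if_pos hz]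
          rw [← hpb, ih k b (fun u hu => hneg u (by simp [List.mem_cons]; tauto)) hb]

-- a full pass from a non-negative element is a carrying pass
theorem bpass_eq_cpass (r : List Int) : ∀ c : Int, 0 ≤ c →
    bpass r.length (c :: r) = cpass c r := by
  induction r with
  | nil => intro c _; rfl
  | cons y t ih =>
      intro c hc
      have hnc : ¬ c < 0 := by omega
      simp only [List.length_cons, bpass, cpass, if_neg hnc]
      split_ifs with h2
      · rw [ih c hc]
      · rw [ih y (by omega)]

theorem cpass_perm (r : List Int) : ∀ c : Int, (cpass c r).Perm (c :: r) := by
  induction r with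
  | nil => intro c; rfl
  | cons y t ih =>
      intro c
      simp only [cpass]
      split_ifs with h
      · exact ((ih c).cons y).trans (List.Perm.swap c y t)
      · exact (ih y).cons c

theorem cpass_getLast? (r : List Int) : ∀ c : Int, (cpass c r).getLast? = some (r.foldl max c) := by
  induction r with
  | nil => intro c; rfl
  | cons y t ih =>
      intro c
      have hne : ∀ d : Int, cpass d t ≠ [] := by
        intro d hnil
        have := (cpass_perm t d).length_eq
        rw [hnil] at this
        simp at this
      simp only [cpass, List.foldl_cons]
      split_ifs with h
      · obtain ⟨z, zs, hz⟩ := List.exists_cons_of_ne_nil (hne c)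
        rw [hz, List.getLast?_cons_cons, ← hz, ih c]
        congr 1
        rw [max_eq_left (le_of_lt h)]
      · obtain ⟨z, zs, hz⟩ := List.exists_cons_of_ne_nil (hne y)
        rw [hz, List.getLast?_cons_cons, ← hz, ih y]
        congr 1
        rw [max_eq_right (by omega)]

theorem cpass_filter_neg (r : List Int) : ∀ c : Int, 0 ≤ c →
    (cpass c r).filter (fun x => x < 0) = r.filter (fun x => x < 0) := by
  induction r with
  | nil =>
      intro c hc
      simp [cpass, show ¬ c < 0 by omega]
  | cons y t ih =>
      intro c hc
      simp only [cpass]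
      split_ifs with h
      · simp only [List.filter_cons, ih c hc]
  
      · have hy : (0:Int) ≤ y := by omega
        simp [show ¬ c < 0 by omega, show ¬ y < 0 by omega, ih y hy]

-- the head of the dropWhile tail fails the predicate
theorem dropWhile_cons_false {α : Type} {p : α → Bool} {l : List α} {x : α} {r : List α}
    (h : l.dropWhile p = x :: r) : p x = false := by
  induction l with
  | nil => simp at h
  | cons a l ih =>
      rw [List.dropWhile_cons] at h
      by_cases hp : p a
      · exact ih (by simpa [hp] using h)
      · simp [hp] at h
        rw [h.1] at hp
        simpa using hp

-- the main characterisation of A's nested loops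
theorem outer_main (n : Nat) : ∀ a : List Int, a.length = n →
    outerIter (n - 1) a = bubbleSortNegatives_alt a := by
  induction n using Nat.strong_induction_on with
  | _ n ih =>
  intro a hn
  cases hd : a.dropWhile (fun z => decide (z < 0)) with
  | nil =>
      have hall : ∀ z ∈ a, z < 0 := by
        intro z hz
        simpa using List.dropWhile_eq_nil_iff.mp hd z hz
      rw [outerIter_allneg _ a hall]
      unfold bubbleSortNegatives_alt
      rw [List.filter_eq_self.mpr (fun z hz => by simpa using hall z hz)]
      rw [List.filter_eq_nil_iff.mpr (fun z hz => by simp; have := hall z hz; omega)]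
      simp
      rfl
  | cons x r =>
      have hx : (0:Int) ≤ x := by
        have := dropWhile_cons_false hd
        simp at this
        omega
      have hneg : ∀ z ∈ a.takeWhile (fun z => decide (z < 0)), z < 0 := fun z hz => by
        simpa using List.mem_takeWhile_imp hz
      have ha : a.takeWhile (fun z => decide (z < 0)) ++ x :: r = a := by
        rw [← hd]; exact List.takeWhile_append_dropWhile
      set p := a.takeWhile (fun z => decide (z < 0)) with hp
      have hlen : n = p.length + (r.length + 1) := by rw [← hn, ← ha]; simp
      by_cases h1 : p.length + r.length = 0
      · -- a = [x]
        have hp0 : p = [] := List.eq_nil_of_length_eq_zero (by omega)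
        have hr0 : r = [] := List.eq_nil_of_length_eq_zero (by omega)
        rw [hp0, hr0] at ha
        simp at ha
        rw [← ha, show n - 1 = 0 by omega]
        unfold bubbleSortNegatives_alt
        simp [show ¬ x < 0 by omega, show (0:Int) ≤ x from hx]
        rfl
      · obtain ⟨K, hK⟩ : ∃ K, n - 1 = K + 1 := ⟨p.length + r.length - 1, by omega⟩
        rw [hK]
        simp only [outerIter]
        have hfull : bpass (K+1) a = p ++ cpass x r := by
          rw [← ha, show K + 1 = p.length + r.length by omega]
          rw [bpass_neg_prefix p r.length (x :: r) hneg (by simp)]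
          rw [bpass_eq_cpass r x hx]
        rw [hfull]
        have hne : cpass x r ≠ [] := by
          intro h0
          have := (cpass_perm r x).length_eq
          rw [h0] at this; simp at this
        set M := r.foldl max x with hM
        have hlast : (cpass x r).getLast hne = M := by
          have h2 := cpass_getLast? r x
          rw [List.getLast?_eq_some_getLast hne] at h2
          exact Option.some_injective _ h2
        set w := (cpass x r).dropLast with hw
        have hdecomp : cpass x r = w ++ [M] := by
          rw [hw, ← hlast]; exact (List.dropLast_append_getLast hne).symm
        have hlcp : (cpass x r).length = r.length + 1 := by
          simpa using (cpass_perm r x).length_eq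
        have hlw : w.length = r.length := by rw [hw, List.length_dropLast, hlcp]; rfl
        have hlv : (p ++ w).length = K + 1 := by simp [hlw]; omega
        rw [show p ++ cpass x r = (p ++ w) ++ [M] by rw [hdecomp, List.append_assoc]]
        rw [outerIter_append K (p ++ w) [M] (by omega)]
        have hIH : outerIter ((K+1) - 1) (p ++ w) = bubbleSortNegatives_alt (p ++ w) :=
          ih (K+1) (by omega) (p ++ w) hlv
        rw [Nat.add_sub_cancel] at hIH
        rw [hIH]
        -- arithmetic facts about M
        have hMmax := PySem.List.le_foldl_max r x
        have hM0 : (0:Int) ≤ M := le_trans hx hMmax.1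
        have perm0 : (w ++ [M]).Perm (x :: r) := hdecomp ▸ cpass_perm r x
        have hwmem : ∀ z ∈ w, z ≤ M := by
          intro z hz
          have : z ∈ x :: r := perm0.mem_iff.mp (by simp [hz])
          rcases List.mem_cons.mp this with h | h
          · rw [h]; exact hMmax.1
          · exact hMmax.2 z h
        -- the negative parts agree
        have hfw : w.filter (fun z => decide (z < 0)) = r.filter (fun z => decide (z < 0)) := by
          have h3 := cpass_filter_neg r x hx
          rw [hdecomp] at h3
          simpa [List.filter_append, show ¬ M < 0 by omega] using h3
        have E1 : (p ++ w).filter (fun z => decide (z < 0)) = a.filter (fun z => decide (z < 0)) := by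
          rw [← ha, List.filter_append, List.filter_append, hfw]
          congr 1
          simp [show ¬ x < 0 by omega]
        -- the sorted non-negative parts agree
        have hpnn : p.filter (fun z => decide (z ≥ 0)) = [] :=
          List.filter_eq_nil_iff.mpr (fun z hz => by simp; have := hneg z hz; omega)
        have E2 : PySem.List.sorted (a.filter (fun z => decide (z ≥ 0))) (fun z => z) =
            PySem.List.sorted ((p ++ w).filter (fun z => decide (z ≥ 0))) (fun z => z) ++ [M] := by
          apply PySem.List.sorted_id_eq_of_perm_of_pairwise
          · -- permutation
            have hq : ((p ++ w).filter (fun z => decide (z ≥ 0))) = w.filter (fun z => decide (z ≥ 0)) := by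
              rw [List.filter_append, hpnn, List.nil_append]
            rw [hq]
            have hperm1 : (w.filter (fun z => decide (z ≥ 0)) ++ [M]).Perm ((x :: r).filter (fun z => decide (z ≥ 0))) := by
              have := perm0.filter (fun z => decide (z ≥ 0))
              simpa [List.filter_append, show x ≥ 0 from hx, show M ≥ 0 from hM0] using this
            have hfa : a.filter (fun z => decide (z ≥ 0)) = (x :: r).filter (fun z => decide (z ≥ 0)) := by
              rw [← ha, List.filter_append, hpnn, List.nil_append]
            rw [hfa]
            exact ((PySem.List.sorted_perm _ _ _).append_right [M]).trans hperm1
          · -- sortedness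
            rw [List.pairwise_append]
            refine ⟨PySem.List.sorted_pairwise _ _, List.pairwise_singleton _ _, ?_⟩
            intro z hz b hb
            rw [List.mem_singleton.mp hb]
            have hzw : z ∈ (p ++ w).filter (fun u => decide (u ≥ 0)) :=
              (PySem.List.mem_sorted _ _ _ _).mp hz
            have : z ∈ p ++ w := List.mem_of_mem_filter hzw
            rcases List.mem_append.mp this with h | h
            · have := hneg z h
              have hz0 : z ≥ 0 := by simpa using List.of_mem_filter hzw
              omega
            · exact hwmem z h
        unfold bubbleSortNegatives_alt
        rw [List.append_assoc, E1, E2]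

-- ===== VERDICT (by name: the statement is the Claim_ definition above) =====
theorem bubbleSortNegatives_spec : Claim_equal_bubbleSortNegatives := by
  intro array _
  unfold Spec_bubbleSortNegatives
  rw [portA_eq_outerIter, outer_main array.length array rfl]
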